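-- pv_equiv track=rewrite | github.com/imaneghball/program-2 | maximum sum.py | Mac_sum
-- ===== SOURCE A (Python) =====
-- def Mac_sum(Array):
--     result=set()
--     a=len(Array)-1
--     count=1
--     for k in range(len(Array)-1):
--         for j in range(a):
--             j+=count
--             result.add(Array[k]+Array[j])
--         count+=1
--         a-=1
--     return max(result)
-- ===== SOURCE B (Python) =====
-- def Mac_sum(Array):
--     m = max(Array)
--     rest = list(Array)
--     rest.remove(m)
--     return m + max(rest)
-- ===== Notes on version B (the rewrite author's own statement) =====
-- stated objective: faster
-- what changed: Replaces the O(n^2) all-pairs nested loop collecting every pairwise sum into a set with two linear max scans: take the maximum, remove one occurrence from a copy, and add the maximum of the rest.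
import Mathlib
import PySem

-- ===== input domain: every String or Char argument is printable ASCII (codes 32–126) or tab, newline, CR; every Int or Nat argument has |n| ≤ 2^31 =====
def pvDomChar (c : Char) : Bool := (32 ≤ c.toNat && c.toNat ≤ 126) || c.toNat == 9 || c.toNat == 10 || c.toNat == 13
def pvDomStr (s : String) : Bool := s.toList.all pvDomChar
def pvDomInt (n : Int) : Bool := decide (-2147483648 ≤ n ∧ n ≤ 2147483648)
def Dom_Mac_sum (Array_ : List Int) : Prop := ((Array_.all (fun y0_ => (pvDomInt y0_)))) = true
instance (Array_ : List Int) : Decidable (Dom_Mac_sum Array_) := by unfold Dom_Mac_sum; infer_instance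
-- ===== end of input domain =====

-- B replaces A's O(n^2) all-pairs sum enumeration with two linear max scans (max, remove one
-- occurrence from a copy, max of the rest); A never mutates its argument and neither does B.

-- ===== PORT A =====
-- body of A's outer 'for k' loop: state = (result, a, count); inner 'for j in range(a): j += count; result.add(...)'
def macStep (Array_ : List Int) (st : PySem.Set Int × Int × Int) (k : Int) : PySem.Set Int × Int × Int :=
  let result := (PySem.List.pyRange 0 st.2.1).foldl
    (fun r j =>
      let j := j + st.2.2
      -- Array[k], Array[j]: both indices are always in range here, so pyGetD is exact
      r.add (PySem.List.pyGetD Array_ k 0 + PySem.List.pyGetD Array_ j 0))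
    st.1
  (result, st.2.1 - 1, st.2.2 + 1)

def Mac_sum (Array_ : List Int) : Int :=
  let st := (PySem.List.pyRange 0 ((Array_.length : Int) - 1)).foldl (macStep Array_)
      (PySem.Set.empty, (Array_.length : Int) - 1, 1)
  -- max(result) raises ValueError on an empty set; Pre_ excludes exactly that (length < 2)
  (PySem.List.max? st.1 (fun x => x)).getD 0

-- ===== PORT B =====
def Mac_sum_alt (Array_ : List Int) : Int :=
  -- m = max(Array): raises on empty input, excluded by Pre_
  let m := (PySem.List.max? Array_ (fun x => x)).getD 0
  -- rest = list(Array); rest.remove(m): m ∈ Array, so remove? succeeds under Pre_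
  let rest := (PySem.List.remove? Array_ m).getD []
  -- max(rest) raises when the input had length 1, excluded by Pre_
  m + (PySem.List.max? rest (fun x => x)).getD 0

-- ===== PRECONDITION & SPEC =====
-- Pre_ excludes exactly the inputs of length < 2, on which both A and B raise ValueError (empty max).
def Pre_Mac_sum (Array_ : List Int) : Prop := 2 ≤ Array_.length
instance (Array_ : List Int) : Decidable (Pre_Mac_sum Array_) := by unfold Pre_Mac_sum; infer_instance
def pvWitness_Mac_sum : List Int := [3, -1, 4]

def Spec_Mac_sum (Array_ : List Int) (out : Int) : Prop := out = Mac_sum_alt Array_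
instance (Array_ : List Int) (out : Int) : Decidable (Spec_Mac_sum Array_ out) := by unfold Spec_Mac_sum; infer_instance

-- ===== CLAIM (what is proved, stated in full; the proofs are below) =====
def Claim_equal_Mac_sum : Prop := ∀ (Array_ : List Int), Dom_Mac_sum Array_ → Pre_Mac_sum Array_ → Spec_Mac_sum Array_ (Mac_sum Array_)

-- ===== LEMMAS AND PROOFS =====

-- The result set built by A's outer loop after the first m iterations (k = 0 .. m-1).
def aState (xs : List Int) (m : Nat) : PySem.Set Int × Int × Int :=
  (List.map (fun k : Nat => (k : Int)) (List.range m)).foldl (macStep xs)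
    (PySem.Set.empty, (xs.length : Int) - 1, 1)

-- Outer-loop invariant: after m iterations a = n-1-m, count = m+1, and the set holds
-- exactly the sums xs[k]+xs[j] with k < m, k < j < n.
theorem aState_inv (xs : List Int) (m : Nat) (hm : m ≤ xs.length - 1) :
    (aState xs m).2.1 = (xs.length : Int) - 1 - m ∧
    (aState xs m).2.2 = (m : Int) + 1 ∧
    (∀ y : Int, y ∈ (aState xs m).1 ↔
      ∃ k j : Nat, k < m ∧ k < j ∧ j < xs.length ∧ y = xs.getD k 0 + xs.getD j 0) := by
  induction m with
  | zero =>
    refine ⟨by simp [aState], by simp [aState], ?_⟩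
    intro y
    simp only [aState, List.range_zero]
    constructor
    · intro h; exact absurd h (by simp [PySem.Set.empty])
    · rintro ⟨k, j, hk, _⟩; omega
  | succ m ih =>
    have hm' : m ≤ xs.length - 1 := by omega
    obtain ⟨ha, hc, hmem⟩ := ih hm'
    have hstep : aState xs (m + 1) = macStep xs (aState xs m) (m : Int) := by
      simp [aState, List.range_succ]
    have hacast : (aState xs m).2.1 = ((xs.length - 1 - m : Nat) : Int) := by
      rw [ha]; omega
    refine ⟨?_, ?_, ?_⟩
    · rw [hstep]; simp only [macStep]; rw [ha]; push_cast; ring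
    · rw [hstep]; simp only [macStep]; rw [hc]; push_cast; ring
    · intro y
      rw [hstep]
      simp only [macStep]
      rw [hacast, PySem.List.pyRange_zero_natCast]
      rw [List.foldl_map, PySem.Set.mem_foldl_add
        (f := fun (b : Nat) => PySem.List.pyGetD xs (m : Int) 0 +
          PySem.List.pyGetD xs ((b : Int) + (aState xs m).2.2) 0)]
      rw [hmem]
      constructor
      · rintro (⟨k, j, hk, hkj, hj, hy⟩ | ⟨b, hb, hy⟩)
        · exact ⟨k, j, by omega, hkj, hj, hy⟩
        · refine ⟨m, b + m + 1, by omega, by omega, ?_, ?_⟩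
          · simp only [List.mem_range] at hb; omega
          · simp only [List.mem_range] at hb
            rw [hy, hc]
            have h2 : (b : Int) + ((m : Int) + 1) = ((b + m + 1 : Nat) : Int) := by push_cast; ring
            rw [h2, PySem.List.pyGetD_natCast, PySem.List.pyGetD_natCast]
      · rintro ⟨k, j, hk, hkj, hj, hy⟩
        by_cases hkm : k < m
        · exact Or.inl ⟨k, j, hkm, hkj, hj, hy⟩
        · have hkm' : k = m := by omega
          refine Or.inr ⟨j - m - 1, ?_, ?_⟩
          · simp only [List.mem_range]; omega
          · rw [hy, hkm', hc]
            have h2 : ((j - m - 1 : Nat) : Int) + ((m : Int) + 1) = ((j : Nat) : Int) := by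
              omega
            rw [h2, PySem.List.pyGetD_natCast, PySem.List.pyGetD_natCast]

-- Mac_sum, rewritten over the Nat-indexed outer range (so aState_inv applies).
theorem Mac_sum_eq_max_aState (xs : List Int) (h : 1 ≤ xs.length) :
    Mac_sum xs = (PySem.List.max? (aState xs (xs.length - 1)).1 (fun x => x)).getD 0 := by
  have hcast : ((xs.length : Int) - 1) = ((xs.length - 1 : Nat) : Int) := by omega
  simp only [Mac_sum, aState, hcast, PySem.List.pyRange_zero_natCast]

-- Main equivalence on lists of length ≥ 2.
theorem mac_sum_eq (xs : List Int) (h : 2 ≤ xs.length) : Mac_sum xs = Mac_sum_alt xs := by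
  -- B's side: name the two maxima
  obtain ⟨m1, hm1⟩ : ∃ m1, PySem.List.max? xs (fun x => x) = some m1 := by
    cases hx : PySem.List.max? xs (fun x => x) with
    | none => rw [PySem.List.max?_eq_none_iff] at hx; subst hx; simp at h
    | some v => exact ⟨v, rfl⟩
  have hm1mem : m1 ∈ xs := PySem.List.max?_mem hm1
  have hm1max : ∀ y ∈ xs, y ≤ m1 := fun y hy => PySem.List.max?_isMax hm1 y hy
  obtain ⟨p, hp⟩ : ∃ p, List.idxOf? m1 xs = some p := by
    have := (List.isSome_idxOf? (l := xs) (a := m1)).mpr hm1mem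
    cases hx : List.idxOf? m1 xs with
    | none => rw [hx] at this; simp at this
    | some v => exact ⟨v, rfl⟩
  obtain ⟨hplt, hpval, -⟩ := List.idxOf?_eq_some_iff.mp hp
  have hrest : PySem.List.remove? xs m1 = some (xs.eraseIdx p) := by
    simp [PySem.List.remove?, hp]
  have hrlen : (xs.eraseIdx p).length = xs.length - 1 := by
    rw [List.length_eraseIdx]; simp [hplt]
  obtain ⟨m2, hm2⟩ : ∃ m2, PySem.List.max? (xs.eraseIdx p) (fun x => x) = some m2 := by
    cases hx : PySem.List.max? (xs.eraseIdx p) (fun x => x) with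
    | none =>
      rw [PySem.List.max?_eq_none_iff] at hx
      have := congrArg List.length hx; simp [hrlen] at this; omega
    | some v => exact ⟨v, rfl⟩
  have hm2mem : m2 ∈ xs.eraseIdx p := PySem.List.max?_mem hm2
  have hm2max : ∀ y ∈ xs.eraseIdx p, y ≤ m2 := fun y hy => PySem.List.max?_isMax hm2 y hy
  have hBval : Mac_sum_alt xs = m1 + m2 := by
    simp only [Mac_sum_alt, hm1, hrest, hm2, Option.getD_some]
  -- A's side
  obtain ⟨-, -, hmem⟩ := aState_inv xs (xs.length - 1) (le_refl _)
  have hmem' : ∀ y : Int, y ∈ (aState xs (xs.length - 1)).1 ↔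
      ∃ k j : Nat, k < j ∧ j < xs.length ∧ y = xs.getD k 0 + xs.getD j 0 := by
    intro y
    rw [hmem y]
    constructor
    · rintro ⟨k, j, -, hkj, hj, hy⟩; exact ⟨k, j, hkj, hj, hy⟩
    · rintro ⟨k, j, hkj, hj, hy⟩; exact ⟨k, j, by omega, hkj, hj, hy⟩
  -- the pair sum m1 + m2 is realized by two distinct indices
  have hach : ∃ k j : Nat, k < j ∧ j < xs.length ∧ m1 + m2 = xs.getD k 0 + xs.getD j 0 := by
    obtain ⟨q, hq, hqp, hqv⟩ := List.mem_eraseIdx_iff_getElem.mp hm2mem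
    by_cases hlt : q < p
    · refine ⟨q, p, hlt, hplt, ?_⟩
      rw [List.getD_eq_getElem xs 0 hq, List.getD_eq_getElem xs 0 hplt, hpval, hqv]; ring
    · refine ⟨p, q, by omega, hq, ?_⟩
      rw [List.getD_eq_getElem xs 0 hplt, List.getD_eq_getElem xs 0 hq, hpval, hqv]
  -- every pair sum is at most m1 + m2
  have hub : ∀ k j : Nat, k < j → j < xs.length → xs.getD k 0 + xs.getD j 0 ≤ m1 + m2 := by
    intro k j hkj hj
    rw [List.getD_eq_getElem xs 0 (by omega), List.getD_eq_getElem xs 0 hj]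
    by_cases hkp : k = p
    · subst hkp
      have h2 : xs[j] ≤ m2 :=
        hm2max _ (List.mem_eraseIdx_iff_getElem.mpr ⟨j, hj, by omega, rfl⟩)
      have hkv : xs[k] = m1 := hpval
      omega
    · have h1 : xs[k] ≤ m2 :=
        hm2max _ (List.mem_eraseIdx_iff_getElem.mpr ⟨k, by omega, hkp, rfl⟩)
      have h2 : xs[j] ≤ m1 := hm1max _ (List.getElem_mem hj)
      omega
  -- A's returned max equals m1 + m2
  obtain ⟨v, hv⟩ : ∃ v, PySem.List.max? (aState xs (xs.length - 1)).1 (fun x => x) = some v := by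
    cases hx : PySem.List.max? (aState xs (xs.length - 1)).1 (fun x => x) with
    | none =>
      rw [PySem.List.max?_eq_none_iff] at hx
      obtain ⟨k, j, hkj, hj, hy⟩ := hach
      have hin : (m1 + m2) ∈ (aState xs (xs.length - 1)).1 :=
        (hmem' _).mpr ⟨k, j, hkj, hj, hy⟩
      rw [hx] at hin; simp at hin
    | some v => exact ⟨v, rfl⟩
  have hvmem := PySem.List.max?_mem hv
  have hvmax : ∀ y ∈ (aState xs (xs.length - 1)).1, y ≤ v :=
    fun y hy => PySem.List.max?_isMax hv y hy
  have hAval : Mac_sum xs = v := by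
    rw [Mac_sum_eq_max_aState xs (by omega), hv, Option.getD_some]
  rw [hAval, hBval]
  have hle : v ≤ m1 + m2 := by
    obtain ⟨k, j, hkj, hj, hy⟩ := (hmem' v).mp hvmem
    rw [hy]; exact hub k j hkj hj
  have hge : m1 + m2 ≤ v := by
    obtain ⟨k, j, hkj, hj, hy⟩ := hach
    exact hvmax (m1 + m2) ((hmem' (m1 + m2)).mpr ⟨k, j, hkj, hj, hy⟩)
  omega

-- ===== VERDICT (by name: the statement is the Claim_ definition above) =====
theorem Mac_sum_spec : Claim_equal_Mac_sum := by
  intro Array_ _ hpre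
  unfold Spec_Mac_sum
  exact mac_sum_eq Array_ hpre
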